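-- pv_equiv track=rewrite | github.com/ih4temyself/algo-2sem | section11/only_duplicates.py | only_duplicates
-- ===== SOURCE A (Python) =====
-- def only_duplicates(st):
--     my_dict = {}
--     for i in st:
--         if i in my_dict.keys():
--             my_dict[i] += 1
--         else:
--             my_dict[i] = 1
--     for i in st:
--         if my_dict[i] == 1:
--             st = st.replace(i, "")
--     return st
-- ===== SOURCE B (Python) =====
-- def only_duplicates(st):
--     dup = {c for c in set(st) if st.count(c) > 1}
--     return "".join(c for c in st if c in dup)
-- ===== Notes on version B (the rewrite author's own statement) =====
-- stated objective: simpler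
-- what changed: Replaces A's incrementally built frequency dictionary and repeated str.replace deletion passes with a set of duplicated characters obtained by one str.count scan per distinct character, followed by a single order-preserving filter of the string.
import Mathlib
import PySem

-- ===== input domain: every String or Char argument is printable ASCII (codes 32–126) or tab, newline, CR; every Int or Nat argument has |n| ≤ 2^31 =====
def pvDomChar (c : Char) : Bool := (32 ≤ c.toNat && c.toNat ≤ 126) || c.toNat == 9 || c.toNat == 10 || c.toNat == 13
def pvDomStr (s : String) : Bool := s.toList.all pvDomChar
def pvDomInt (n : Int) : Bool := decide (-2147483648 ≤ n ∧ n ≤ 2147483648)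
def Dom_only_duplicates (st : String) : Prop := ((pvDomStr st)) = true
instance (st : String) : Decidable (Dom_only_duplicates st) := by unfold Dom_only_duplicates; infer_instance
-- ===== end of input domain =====

-- B drops A's frequency dictionary and replace passes: it keeps, in order, each character
-- whose occurrence count in the original string exceeds one (objective: simpler).

-- ===== PORT A =====
-- first loop: build the frequency dict; second loop: for each char of the ORIGINAL string
-- (Python's for-iterator is fixed at loop entry), delete it from st if its count is 1.
-- my_dict[i] is ported as getD _ 0: every i iterated over is a key of my_dict, so the
-- Python lookup never raises.
def only_duplicates (st : String) : String :=
  let my_dict : PySem.Dict Char Int :=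
    st.toList.foldl
      (fun d i => if d.contains i then d.modify i 0 (· + 1) else d.insert i 1)
      PySem.Dict.empty
  st.toList.foldl
    (fun s i => if my_dict.getD i 0 == 1 then PySem.Str.replace s (String.ofList [i]) "" else s)
    st

-- ===== PORT B =====
-- dup = {c for c in set(st) if st.count(c) > 1};  "".join(c for c in st if c in dup)
def only_duplicates_alt (st : String) : String :=
  let dup : List Char :=
    (PySem.Set.ofList st.toList).filter (fun c => decide (1 < PySem.Str.count st (String.ofList [c])))
  String.ofList (st.toList.filter (fun c => dup.contains c))

-- ===== PRECONDITION & SPEC =====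
def Spec_only_duplicates (st : String) (out : String) : Prop := out = only_duplicates_alt st
instance (st : String) (out : String) : Decidable (Spec_only_duplicates st out) := by unfold Spec_only_duplicates; infer_instance

-- ===== CLAIM (what is proved, stated in full; the proofs are below) =====
def Claim_equal_only_duplicates : Prop := ∀ (st : String), Dom_only_duplicates st → Spec_only_duplicates st (only_duplicates st)

-- ===== LEMMAS AND PROOFS =====

-- the frequency dict of A returns the count of v in l
theorem pv_dict_count (l : List Char) (d : PySem.Dict Char Int) (v : Char) :
    (l.foldl (fun d i => if d.contains i then d.modify i 0 (· + 1) else d.insert i 1) d).getD v 0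
      = d.getD v 0 + (l.count v : Int) := by
  induction l generalizing d with
  | nil => simp
  | cons a t ih =>
    simp only [List.foldl_cons, ih, List.count_cons]
    by_cases hc : d.contains a
    · simp only [hc, if_true, PySem.Dict.getD_modify]
      by_cases hv : v = a
      · subst hv; simp; push_cast; omega
      · simp [hv, Ne.symm hv]
    · simp only [hc, Bool.false_eq_true, if_false, PySem.Dict.getD_insert]
      by_cases hv : v = a
      · subst hv
        rw [PySem.Dict.getD_of_not_contains d 0 (by simpa using hc)]
        simp; push_cast; omega
      · simp [hv, Ne.symm hv]

-- Chars.count.go for a single-character needle is List.count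
theorem pv_count_go_single (c : Char) :
    ∀ (l : List Char) (fuel : Nat) (acc : Nat), l.length ≤ fuel →
      PySem.Chars.count.go [c] fuel l acc = acc + l.count c := by
  intro l
  induction l with
  | nil => intro fuel acc _; cases fuel <;> simp [PySem.Chars.count.go]
  | cons a t ih =>
    intro fuel acc h
    cases fuel with
    | zero => simp at h
    | succ fuel =>
      by_cases hac : a = c
      · subst hac
        simp only [PySem.Chars.count.go, List.isPrefixOf, List.drop]
        simp [ih fuel (acc + 1) (by simpa using h), List.count_cons]
        ring
      · have hbc : (c == a) = false := by simpa using (Ne.symm hac)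
        simp only [PySem.Chars.count.go, List.isPrefixOf, hbc]
        simp [ih fuel acc (by simpa using Nat.le_of_succ_le_succ h), List.count_cons, hac,
          Ne.symm hac]

theorem pv_count_single (l : List Char) (c : Char) :
    PySem.Chars.count l [c] = l.count c := by
  simp [PySem.Chars.count, pv_count_go_single c l l.length 0 (le_refl _)]

-- Chars.replace with a single-character needle and empty replacement is a filter
theorem pv_replace_go_single (c : Char) :
    ∀ (l : List Char) (fuel : Nat) (acc : List Char), l.length ≤ fuel →
      PySem.Chars.replace.go [c] [] fuel l acc = acc.reverse ++ l.filter (fun x => x != c) := by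
  intro l
  induction l with
  | nil => intro fuel acc _; cases fuel <;> simp [PySem.Chars.replace.go]
  | cons a t ih =>
    intro fuel acc h
    cases fuel with
    | zero => simp at h
    | succ fuel =>
      by_cases hac : a = c
      · subst hac
        simp only [PySem.Chars.replace.go, List.isPrefixOf, List.drop]
        simp [ih fuel acc (by simpa using h)]
      · have hbc : (c == a) = false := by simpa using (Ne.symm hac)
        simp only [PySem.Chars.replace.go, List.isPrefixOf, hbc]
        simp [ih fuel (a :: acc) (by simpa using Nat.le_of_succ_le_succ h), hac]

theorem pv_replace_single (l : List Char) (c : Char) :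
    PySem.Chars.replace l [c] [] = l.filter (fun x => x != c) := by
  simp [PySem.Chars.replace, pv_replace_go_single c l l.length [] (le_refl _)]

-- the string-level replace loop computed on toList
theorem pv_strfold (p : Char → Bool) :
    ∀ (cs : List Char) (s : String),
      (cs.foldl (fun s i => if p i then PySem.Str.replace s (String.ofList [i]) "" else s) s).toList
        = cs.foldl (fun t i => if p i then t.filter (fun x => x != i) else t) s.toList := by
  intro cs
  induction cs with
  | nil => intro s; simp
  | cons a t ih =>
    intro s
    simp only [List.foldl_cons, ih]
    by_cases hp : p a
    · simp [hp, PySem.Str.replace, pv_replace_single, String.toList_ofList]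
    · simp [hp]

-- the list-level replace loop is a single filter
theorem pv_listloop (p : Char → Bool) :
    ∀ (cs : List Char) (s : List Char),
      cs.foldl (fun t i => if p i then t.filter (fun x => x != i) else t) s
        = s.filter (fun x => !(p x && decide (x ∈ cs))) := by
  intro cs
  induction cs with
  | nil => intro s; simp
  | cons a t ih =>
    intro s
    simp only [List.foldl_cons, ih]
    by_cases hp : p a
    · simp only [hp, if_true, List.filter_filter]
      apply List.filter_congr
      intro x _
      by_cases hx : x = a
      · subst hx; simp [hp]
      · simp [hx]
    · simp only [hp, if_false]
      apply List.filter_congr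
      intro x _
      by_cases hx : x = a
      · subst hx; simp [hp]
      · simp [hx]

-- ===== VERDICT (by name: the statement is the Claim_ definition above) =====
theorem only_duplicates_spec : Claim_equal_only_duplicates := by
  intro st _
  unfold Spec_only_duplicates only_duplicates only_duplicates_alt
  apply String.toList_inj.mp
  rw [pv_strfold, pv_listloop, String.toList_ofList]
  apply List.filter_congr
  intro x hx
  have hpos : 0 < st.toList.count x := List.count_pos_iff.mpr hx
  simp only [PySem.Str.count, String.toList_ofList, pv_count_single,
    pv_dict_count st.toList PySem.Dict.empty x, PySem.Dict.getD_empty,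
    List.contains_eq_mem, List.mem_filter, PySem.Set.mem_ofList]
  by_cases h1 : st.toList.count x = 1
  · simp [hx, h1]
  · have h2 : 1 < st.toList.count x := by omega
    have h3 : ((st.toList.count x : Int)) ≠ 1 := by exact_mod_cast h1
    simp [hx, h2, h3]
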